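-- pv_equiv track=rewrite | github.com/bingneef/rekenkamer-report-dashboard | dashboard/helpers/app_engine.py | deflate_group_sources
-- ===== SOURCE A (Python) =====
-- ALL_REPORTS = [
--     'rekenkamer',
--     'rathenau'
-- ]
--
-- ALL_KAMERSTUKKEN = [
--     'Verslag van een commissiedebat',
--     'Brief regering',
--     'Verslag van een wetgevingsoverleg',
--     'Motie',
--     'Schriftelijke vragen',
--     'Verslag van een schriftelijk overleg'
-- ]
--
-- def deflate_group_sources(grouped_sources):
--     sources = []
--     for grouped_source in grouped_sources:
--         if grouped_source == 'all':
--             sources.extend(ALL_REPORTS + ALL_KAMERSTUKKEN)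
--         elif grouped_source == 'all_reports':
--             sources.extend(ALL_REPORTS)
--         elif grouped_source == 'all_kamerstukken':
--             sources.extend(ALL_KAMERSTUKKEN)
--         else:
--             sources.append(grouped_source)
--
--     return sources
-- ===== SOURCE B (Python) =====
-- ALL_REPORTS = [
--     'rekenkamer',
--     'rathenau'
-- ]
--
-- ALL_KAMERSTUKKEN = [
--     'Verslag van een commissiedebat',
--     'Brief regering',
--     'Verslag van een wetgevingsoverleg',
--     'Motie',
--     'Schriftelijke vragen',
--     'Verslag van een schriftelijk overleg'
-- ]
--
-- # Rewrite rules: a group token rewrites to a list of tokens that are pushed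
-- # back onto the worklist and reprocessed; 'all' rewrites to the two sub-group
-- # tokens rather than being expanded directly.  Only terminal tokens (no rule)
-- # ever reach the output.
-- _RULES = {
--     'all': ['all_reports', 'all_kamerstukken'],
--     'all_reports': ALL_REPORTS,
--     'all_kamerstukken': ALL_KAMERSTUKKEN,
-- }
--
-- def deflate_group_sources(grouped_sources):
--     out = []
--     stack = list(reversed(grouped_sources))
--     while stack:
--         g = stack.pop()
--         r = _RULES.get(g)
--         if r is None:
--             out.append(g)
--         else:
--             stack.extend(reversed(r))
--     return out
-- ===== Notes on version B (the rewrite author's own statement) =====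
-- stated objective: alternative
-- what changed: Replaces A's if/elif chain that extends/appends expansions directly onto the result by a worklist rewrite system: a rule table maps group tokens to token lists that are pushed back onto a pending stack and reprocessed ('all' rewrites to the two sub-group tokens), and only terminal tokens reach the output one at a time.
import Mathlib
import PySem

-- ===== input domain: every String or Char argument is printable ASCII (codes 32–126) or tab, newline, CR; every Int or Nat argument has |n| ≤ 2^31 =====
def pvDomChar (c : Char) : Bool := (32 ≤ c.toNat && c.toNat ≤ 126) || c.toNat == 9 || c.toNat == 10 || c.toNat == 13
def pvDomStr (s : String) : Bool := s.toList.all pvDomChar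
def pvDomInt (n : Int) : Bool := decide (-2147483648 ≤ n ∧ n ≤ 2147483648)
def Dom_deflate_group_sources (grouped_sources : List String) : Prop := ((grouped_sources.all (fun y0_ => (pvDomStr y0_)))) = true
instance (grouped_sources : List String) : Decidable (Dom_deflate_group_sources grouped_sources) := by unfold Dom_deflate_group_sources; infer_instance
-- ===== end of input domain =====

-- B replaces A's direct extend/append chain by a worklist rewrite system ('all' rewrites to the two sub-group tokens, pushed back and reprocessed); alternative decomposition, same cost.

-- ===== PORT A =====
def ALL_REPORTS : List String := ["rekenkamer", "rathenau"]

def ALL_KAMERSTUKKEN : List String :=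
  ["Verslag van een commissiedebat", "Brief regering",
   "Verslag van een wetgevingsoverleg", "Motie",
   "Schriftelijke vragen", "Verslag van een schriftelijk overleg"]

def deflate_group_sources (grouped_sources : List String) : List String :=
  grouped_sources.foldl (fun sources grouped_source =>
    if grouped_source == "all" then sources ++ (ALL_REPORTS ++ ALL_KAMERSTUKKEN)
    else if grouped_source == "all_reports" then sources ++ ALL_REPORTS
    else if grouped_source == "all_kamerstukken" then sources ++ ALL_KAMERSTUKKEN
    else sources ++ [grouped_source]) []

-- ===== PORT B =====
-- _RULES.get(g)
def pvRule (g : String) : Option (List String) :=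
  if g == "all" then some ["all_reports", "all_kamerstukken"]
  else if g == "all_reports" then some ALL_REPORTS
  else if g == "all_kamerstukken" then some ALL_KAMERSTUKKEN
  else none

-- termination measure for the worklist: each rule strictly lowers total weight
def pvWeight (g : String) : Nat :=
  if g == "all" then 11
  else if g == "all_reports" then 3
  else if g == "all_kamerstukken" then 7
  else 1

def pvW (gs : List String) : Nat := (gs.map pvWeight).sum

lemma pvWeight_pos (g : String) : 1 ≤ pvWeight g := by
  unfold pvWeight; split_ifs <;> omega

-- each rewrite rule strictly lowers the total weight of the worklist
lemma pvW_rule (g : String) (r : List String) (h : (if g == "all" then some ["all_reports", "all_kamerstukken"]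
    else if g == "all_reports" then some ALL_REPORTS
    else if g == "all_kamerstukken" then some ALL_KAMERSTUKKEN
    else none) = some r) : pvW r < pvWeight g := by
  by_cases h1 : g = "all"
  · subst h1
    have hr : r = ["all_reports", "all_kamerstukken"] := by simpa using h.symm
    subst hr; decide
  · by_cases h2 : g = "all_reports"
    · subst h2
      have hr : r = ALL_REPORTS := by simpa using h.symm
      subst hr; decide
    · by_cases h3 : g = "all_kamerstukken"
      · subst h3
        have hr : r = ALL_KAMERSTUKKEN := by simpa [h2] using h.symm
        subst hr; decide
      · simp [h1, h2, h3] at h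

-- the while loop; the Lean stack's HEAD is the Python stack's popped end,
-- so 'stack.extend(reversed(r))' becomes 'r ++ stack' and the initial
-- 'list(reversed(grouped_sources))' is just 'grouped_sources'
def pvLoop (out : List String) (stack : List String) : List String :=
  match stack with
  | [] => out
  | g :: stack' =>
    match h : pvRule g with
    | none => pvLoop (out ++ [g]) stack'
    | some r => pvLoop out (r ++ stack')
termination_by pvW stack
decreasing_by
  · have := pvWeight_pos g
    simp [pvW]; omega
  · have h' : pvW r < pvWeight g := pvW_rule g r (by simpa [pvRule] using h)
    simp [pvW] at h'
    simp [pvW]; omega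

def deflate_group_sources_alt (grouped_sources : List String) : List String :=
  pvLoop [] grouped_sources

-- ===== PRECONDITION & SPEC =====
def Spec_deflate_group_sources (grouped_sources : List String) (out : List String) : Prop := out = deflate_group_sources_alt grouped_sources
instance (grouped_sources : List String) (out : List String) : Decidable (Spec_deflate_group_sources grouped_sources out) := by unfold Spec_deflate_group_sources; infer_instance

-- ===== CLAIM (what is proved, stated in full; the proofs are below) =====
def Claim_equal_deflate_group_sources : Prop := ∀ (grouped_sources : List String), Dom_deflate_group_sources grouped_sources → Spec_deflate_group_sources grouped_sources (deflate_group_sources grouped_sources)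

-- ===== LEMMAS AND PROOFS =====
-- the one-shot expansion both programs compute
def pvExpand (g : String) : List String :=
  if g == "all" then ALL_REPORTS ++ ALL_KAMERSTUKKEN
  else if g == "all_reports" then ALL_REPORTS
  else if g == "all_kamerstukken" then ALL_KAMERSTUKKEN
  else [g]

-- one rewrite step preserves the one-shot expansion of the worklist
lemma rule_expand (g : String) (r : List String) (h : pvRule g = some r) :
    r.flatMap pvExpand = pvExpand g := by
  by_cases h1 : g = "all"
  · subst h1
    have hr : r = ["all_reports", "all_kamerstukken"] := by simpa [pvRule] using h.symm
    subst hr; decide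
  · by_cases h2 : g = "all_reports"
    · subst h2
      have hr : r = ALL_REPORTS := by simpa [pvRule] using h.symm
      subst hr; decide
    · by_cases h3 : g = "all_kamerstukken"
      · subst h3
        have hr : r = ALL_KAMERSTUKKEN := by simpa [pvRule, h2] using h.symm
        subst hr; decide
      · simp [pvRule, h1, h2, h3] at h

lemma rule_none_expand (g : String) (h : pvRule g = none) : pvExpand g = [g] := by
  simp only [pvRule] at h
  split_ifs at h with h1 h2 h3
  simp [pvExpand, h1, h2, h3]

lemma pvLoop_eq (out stack : List String) :
    pvLoop out stack = out ++ stack.flatMap pvExpand := by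
  induction out, stack using pvLoop.induct with
  | case1 out => simp [pvLoop]
  | case2 out g stack' h ih =>
    rw [pvLoop]
    split
    · simp [ih, rule_none_expand g h]
    · simp_all
  | case3 out g stack' r h ih =>
    rw [pvLoop]
    split
    · simp_all
    · rename_i r' h'
      rw [h] at h'
      injection h' with hr
      subst hr
      simp [ih, List.flatMap_append, rule_expand g r h]

lemma foldl_acc (gs : List String) (acc : List String) :
    gs.foldl (fun sources g =>
      if g == "all" then sources ++ (ALL_REPORTS ++ ALL_KAMERSTUKKEN)
      else if g == "all_reports" then sources ++ ALL_REPORTS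
      else if g == "all_kamerstukken" then sources ++ ALL_KAMERSTUKKEN
      else sources ++ [g]) acc
    = acc ++ gs.flatMap pvExpand := by
  induction gs generalizing acc with
  | nil => simp
  | cons g gs ih =>
    simp only [List.foldl_cons, List.flatMap_cons, pvExpand]
    split_ifs <;> rw [ih] <;> simp [List.append_assoc]

-- ===== VERDICT (by name: the statement is the Claim_ definition above) =====
theorem deflate_group_sources_spec : Claim_equal_deflate_group_sources := by
  intro gs _
  show _ = _
  unfold deflate_group_sources deflate_group_sources_alt
  rw [foldl_acc, pvLoop_eq]
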